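-- pv_equiv track=rewrite | github.com/Jamsey911/battleship_pm3 | run.py | check_ok
-- ===== SOURCE A (Python) =====
-- def check_ok(boat, taken):
--     for i in range(len(boat)):
--         num = boat[i]
--         if num in taken:
--             boat = [-1]
--             break
--         elif num < 0 or num > 99:
--             boat = [-1]
--             break
--         elif num % 10 == 9 and i < len(boat) - 1:
--             if boat[i+1] % 10 == 0:
--                 boat = [-1]
--                 break
--     return boat
-- ===== SOURCE B (Python) =====
-- def check_ok(boat, taken):
--     bad = any(n in taken or n < 0 or n > 99 for n in boat) or \
--           any(a % 10 == 9 and b % 10 == 0 for a, b in zip(boat, boat[1:]))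
--     return [-1] if bad else boat
-- ===== Notes on version B (the rewrite author's own statement) =====
-- stated objective: simpler
-- what changed: Replaced A's single indexed loop with break (per-index elif chain that also peeks at boat[i+1] under an i < len-1 guard) by two independent declarative scans: an any() over the cells for taken/out-of-range, and an any() over zip(boat, boat[1:]) pairs for the horizontal wrap; returns [-1] or the original boat.
import Mathlib
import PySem

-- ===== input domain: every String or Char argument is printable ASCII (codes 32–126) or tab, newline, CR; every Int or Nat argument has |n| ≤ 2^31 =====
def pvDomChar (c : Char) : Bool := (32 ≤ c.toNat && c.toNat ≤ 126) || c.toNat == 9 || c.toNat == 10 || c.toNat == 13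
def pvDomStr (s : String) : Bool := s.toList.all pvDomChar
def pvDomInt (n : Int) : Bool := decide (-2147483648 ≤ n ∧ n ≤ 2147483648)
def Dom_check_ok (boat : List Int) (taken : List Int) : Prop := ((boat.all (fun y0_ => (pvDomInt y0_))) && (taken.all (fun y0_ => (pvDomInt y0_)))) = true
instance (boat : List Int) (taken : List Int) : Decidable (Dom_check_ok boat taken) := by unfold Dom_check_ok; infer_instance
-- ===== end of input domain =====

-- B replaces A's fused indexed loop with early exit by two independent whole-list
-- scans (per-cell validity, and a pairwise zip scan for the horizontal wrap); simpler.

-- ===== PORT A =====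
-- A's for-loop with break: a foldl over the index range carrying an Option
-- "broken" state (some [-1] once a check fires; absorbing thereafter).
def check_ok_step (boat : List Int) (taken : List Int)
    (st : Option (List Int)) (i : Nat) : Option (List Int) :=
  match st with
  | some r => some r
  | none =>
    let num := boat.getD i 0      -- boat[i]; i < len(boat) always, so getD is exact
    if num ∈ taken then some [-1]
    else if num < 0 ∨ num > 99 then some [-1]
    else if num % 10 = 9 ∧ i < boat.length - 1 then
      (if boat.getD (i+1) 0 % 10 = 0 then some [-1] else none)
    else none

def check_ok (boat : List Int) (taken : List Int) : List Int :=
  match (List.range boat.length).foldl (check_ok_step boat taken) none with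
  | some r => r
  | none => boat

-- ===== PORT B =====
def check_ok_alt (boat : List Int) (taken : List Int) : List Int :=
  let bad := boat.any (fun n => n ∈ taken || n < 0 || n > 99) ||
    (boat.zip (boat.drop 1)).any (fun p => p.1 % 10 == 9 && p.2 % 10 == 0)
  if bad then [-1] else boat

-- ===== PRECONDITION & SPEC =====
def Spec_check_ok (boat : List Int) (taken : List Int) (out : List Int) : Prop := out = check_ok_alt boat taken
instance (boat : List Int) (taken : List Int) (out : List Int) : Decidable (Spec_check_ok boat taken out) := by unfold Spec_check_ok; infer_instance

-- ===== CLAIM (what is proved, stated in full; the proofs are below) =====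
def Claim_equal_check_ok : Prop := ∀ (boat : List Int) (taken : List Int), Dom_check_ok boat taken → Spec_check_ok boat taken (check_ok boat taken)

-- ===== LEMMAS AND PROOFS =====

-- per-index trigger of A's loop, as a Bool
def trigA (boat : List Int) (taken : List Int) (i : Nat) : Bool :=
  (decide (boat.getD i 0 ∈ taken)) || (decide (boat.getD i 0 < 0)) || (decide (boat.getD i 0 > 99)) ||
  ((decide (boat.getD i 0 % 10 = 9)) && (decide (i < boat.length - 1)) && (decide (boat.getD (i+1) 0 % 10 = 0)))

theorem step_none (boat taken : List Int) (i : Nat) :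
    check_ok_step boat taken none i =
      (if trigA boat taken i then some [-1] else none) := by
  simp only [check_ok_step, trigA]
  by_cases h1 : boat.getD i 0 ∈ taken <;>
  by_cases h2 : boat.getD i 0 < 0 <;>
  by_cases h3 : boat.getD i 0 > 99 <;>
  by_cases h4 : boat.getD i 0 % 10 = 9 <;>
  by_cases h5 : i < boat.length - 1 <;>
  by_cases h6 : boat.getD (i+1) 0 % 10 = 0 <;>
  simp_all <;> split_ifs <;> simp_all <;> omega

theorem step_some (boat taken : List Int) (r : List Int) (l : List Nat) :
    l.foldl (check_ok_step boat taken) (some r) = some r := by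
  induction l with
  | nil => rfl
  | cons a l ih => simpa [check_ok_step] using ih

theorem foldl_break (boat taken : List Int) (l : List Nat) :
    l.foldl (check_ok_step boat taken) none =
      (if l.any (trigA boat taken) then some [-1] else none) := by
  induction l with
  | nil => rfl
  | cons a l ih =>
    simp only [List.foldl_cons, List.any_cons, step_none]
    by_cases h : trigA boat taken a
    · simp [h, step_some]
    · simp [h, ih]

theorem getelem_drop_one (boat : List Int) (i : Nat) (h : i < (List.drop 1 boat).length) :
    (List.drop 1 boat)[i] = boat[i+1]'(by simp at h; omega) := by
  rw [List.getElem_drop]; congr 1; omega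

theorem any_range_eq (boat taken : List Int) :
    (List.range boat.length).any (trigA boat taken) =
      (boat.any (fun n => n ∈ taken || n < 0 || n > 99) ||
       (boat.zip (boat.drop 1)).any (fun p => p.1 % 10 == 9 && p.2 % 10 == 0)) := by
  rw [Bool.eq_iff_iff]
  simp only [trigA, List.any_eq_true, List.mem_range, Bool.or_eq_true, Bool.and_eq_true,
    decide_eq_true_eq, beq_iff_eq]
  constructor
  · rintro ⟨i, hi, ((h | h) | h) | ⟨⟨h9, hlt⟩, h0⟩⟩
    · exact Or.inl ⟨boat.getD i 0, by rw [List.getD_eq_getElem _ _ hi]; exact List.getElem_mem hi, Or.inl (Or.inl h)⟩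
    · exact Or.inl ⟨boat.getD i 0, by rw [List.getD_eq_getElem _ _ hi]; exact List.getElem_mem hi, Or.inl (Or.inr h)⟩
    · exact Or.inl ⟨boat.getD i 0, by rw [List.getD_eq_getElem _ _ hi]; exact List.getElem_mem hi, Or.inr h⟩
    · right
      have hi2 : i + 1 < boat.length := by omega
      have hzlen : i < (boat.zip (List.drop 1 boat)).length := by
        rw [List.length_zip, List.length_drop]; omega
      have hdl : i < (List.drop 1 boat).length := by simp; omega
      have hz : (boat.zip (List.drop 1 boat))[i] = (boat[i], boat[i+1]) := by
        rw [List.getElem_zip, getelem_drop_one]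
      refine ⟨(boat[i], boat[i+1]), hz ▸ List.getElem_mem hzlen, ?_⟩
      rw [List.getD_eq_getElem _ _ hi] at h9
      rw [List.getD_eq_getElem _ _ hi2] at h0
      exact ⟨h9, h0⟩
  · rintro (⟨x, hx, h⟩ | ⟨p, hp, h⟩)
    · obtain ⟨i, hi, rfl⟩ := List.getElem_of_mem hx
      exact ⟨i, hi, Or.inl (by rw [List.getD_eq_getElem _ _ hi]; exact h)⟩
    · obtain ⟨i, hi, rfl⟩ := List.getElem_of_mem hp
      have hlen : i + 1 < boat.length := by
        rw [List.length_zip, List.length_drop] at hi; omega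
      have hdl : i < (List.drop 1 boat).length := by simp; omega
      have hz : (boat.zip (List.drop 1 boat))[i] = (boat[i], boat[i+1]) := by
        rw [List.getElem_zip, getelem_drop_one]
      rw [hz] at h
      refine ⟨i, by omega, Or.inr ⟨⟨?_, by omega⟩, ?_⟩⟩
      · rw [List.getD_eq_getElem _ _ (by omega : i < boat.length)]; exact h.1
      · rw [List.getD_eq_getElem _ _ hlen]; exact h.2

-- ===== VERDICT (by name: the statement is the Claim_ definition above) =====
theorem check_ok_spec : Claim_equal_check_ok := by
  intro boat taken _
  unfold Spec_check_ok check_ok check_ok_alt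
  rw [foldl_break, any_range_eq]
  by_cases h : (boat.any (fun n => n ∈ taken || n < 0 || n > 99) ||
       (boat.zip (boat.drop 1)).any (fun p => p.1 % 10 == 9 && p.2 % 10 == 0)) = true
  · rw [if_pos h, if_pos h]
  · rw [if_neg h, if_neg h]
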